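-- pv_equiv track=rewrite | github.com/wonnerky/coteMaster | DongbinNa/18/pt.py | solution
-- ===== SOURCE A (Python) =====
-- def solution(p):
--     def recursion(text):
--         if text == '':
--             return ''
--         cnt = 0
--         idx = 0
--         for ele in text:
--             if ele == '(':
--                 cnt += 1
--             else:
--                 cnt -= 1
--             if cnt == 0:
--                 break
--             idx += 1
--         u = text[:idx + 1]
--         v = text[idx + 1:]
--
--         cnt = 0
--         for ele in u:
--             if ele == '(':
--                 cnt += 1
--             else:
--                 cnt -= 1
--             if cnt < 0:
--                 result = '(' + recursion(v) + ')'
--                 for i in range(1, len(u) - 1):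
--                     if u[i] == '(':
--                         result += ')'
--                     else:
--                         result += '('
--                 return result
--             else:
--                 return u + recursion(v)
--
--     answer = recursion(p)
--     return answer
-- ===== SOURCE B (Python) =====
-- def solution(p):
--     # chunking pass + right fold instead of interleaved recursion; same return value
--     chunks = []
--     i = 0
--     n = len(p)
--     while i < n:
--         cnt = 0
--         j = i
--         while j < n:
--             cnt += 1 if p[j] == '(' else -1
--             j += 1
--             if cnt == 0:
--                 break
--         chunks.append(p[i:j])
--         i = j
--     acc = ''
--     for u in reversed(chunks):
--         if u[0] == '(':
--             acc = u + acc
--         else: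
--             acc = '(' + acc + ')' + ''.join(')' if c == '(' else '(' for c in u[1:-1])
--     return acc
-- ===== Notes on version B (the rewrite author's own statement) =====
-- stated objective: alternative
-- what changed: Replaces A's interleaved self-recursion with a two-pass design: first a chunking scan that splits p into minimal balanced-prefix chunks, then a right-to-left fold over the chunk list that assembles the answer.
import Mathlib
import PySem

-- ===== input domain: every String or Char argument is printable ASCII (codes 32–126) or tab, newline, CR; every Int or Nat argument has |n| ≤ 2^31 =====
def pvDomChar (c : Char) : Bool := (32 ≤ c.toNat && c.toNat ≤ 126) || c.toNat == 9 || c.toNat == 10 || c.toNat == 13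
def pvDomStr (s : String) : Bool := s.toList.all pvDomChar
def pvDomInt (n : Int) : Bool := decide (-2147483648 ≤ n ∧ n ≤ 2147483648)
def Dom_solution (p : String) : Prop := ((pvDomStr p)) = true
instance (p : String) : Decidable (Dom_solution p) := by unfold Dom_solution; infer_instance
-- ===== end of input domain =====

-- B replaces A's interleaved recursion by a chunking pass plus a right fold (alternative decomposition, same cost).

-- ===== PORT A =====
-- first for-loop of recursion: idx = chars consumed before the break (= length if no break)
def pvFindIdx (cnt : Int) (idx : Nat) : List Char → Nat
  | [] => idx
  | c :: t =>
    let cnt' := cnt + (if c = '(' then 1 else -1)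
    if cnt' = 0 then idx else pvFindIdx cnt' (idx + 1) t

-- the inner for-loop building the flipped middle: for i in range(1, len(u)-1)
def pvFlipMid (u : List Char) : List Char :=
  (u.drop 1).dropLast.map (fun c => if c = '(' then ')' else '(')

-- second for-loop of recursion (returns on its first iteration), rv = recursion(v)
def pvSecond (u rv : List Char) : List Char :=
  match u with
  | [] => []  -- unreachable: u is always nonempty
  | c :: _ =>
    let cnt : Int := if c = '(' then 1 else -1
    if cnt < 0 then '(' :: rv ++ ')' :: pvFlipMid u
    else u ++ rv

def pvRecA : List Char → List Char
  | [] => []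
  | c0 :: t =>
    let idx := pvFindIdx 0 0 (c0 :: t)
    pvSecond ((c0 :: t).take (idx + 1)) (pvRecA ((c0 :: t).drop (idx + 1)))
termination_by l => l.length
decreasing_by simp only [List.length_drop, List.length_cons]; omega

def solution (p : String) : String := String.mk (pvRecA p.toList)

-- ===== PORT B =====
-- inner while: length of the first chunk (stops right after the running count hits 0)
def pvChunkLen (cnt : Int) : List Char → Nat
  | [] => 0
  | c :: t =>
    let cnt' := cnt + (if c = '(' then 1 else -1)
    if cnt' = 0 then 1 else 1 + pvChunkLen cnt' t

-- pvChunks needs this for termination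
theorem pvChunkLen_pos (c : Char) (t : List Char) (cnt : Int) : 1 ≤ pvChunkLen cnt (c :: t) := by
  by_cases h : cnt + (if c = '(' then 1 else -1) = 0
  · simp [pvChunkLen, h]
  · simp only [pvChunkLen, h, if_false]; omega

-- outer while: the list of chunks
def pvChunks : List Char → List (List Char)
  | [] => []
  | c0 :: t =>
    let k := pvChunkLen 0 (c0 :: t)
    (c0 :: t).take k :: pvChunks ((c0 :: t).drop k)
termination_by l => l.length
decreasing_by
  have := pvChunkLen_pos c0 t 0
  simp only [List.length_drop, List.length_cons]
  omega

-- body of the fold over reversed(chunks)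
def pvStep (u acc : List Char) : List Char :=
  match u with
  | [] => acc  -- unreachable: every chunk is nonempty
  | c :: _ =>
    if c = '(' then u ++ acc
    else '(' :: acc ++ ')' :: (u.drop 1).dropLast.map (fun c => if c = '(' then ')' else '(')

def solution_alt (p : String) : String :=
  String.mk ((pvChunks p.toList).foldr pvStep [])

-- ===== PRECONDITION & SPEC =====
def Spec_solution (p : String) (out : String) : Prop := out = solution_alt p
instance (p : String) (out : String) : Decidable (Spec_solution p out) := by unfold Spec_solution; infer_instance

-- ===== CLAIM (what is proved, stated in full; the proofs are below) =====
def Claim_equal_solution : Prop := ∀ (p : String), Dom_solution p → Spec_solution p (solution p)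

-- ===== LEMMAS AND PROOFS =====

theorem pvRecA_nil : pvRecA [] = [] := by rw [pvRecA]

theorem pvRecA_cons (c0 : Char) (t : List Char) : pvRecA (c0 :: t) =
    pvSecond ((c0 :: t).take (pvFindIdx 0 0 (c0 :: t) + 1))
             (pvRecA ((c0 :: t).drop (pvFindIdx 0 0 (c0 :: t) + 1))) := by rw [pvRecA]

theorem pvChunks_nil : pvChunks [] = [] := by rw [pvChunks]

theorem pvChunks_cons (c0 : Char) (t : List Char) : pvChunks (c0 :: t) =
    (c0 :: t).take (pvChunkLen 0 (c0 :: t)) :: pvChunks ((c0 :: t).drop (pvChunkLen 0 (c0 :: t))) := by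
  rw [pvChunks]

theorem pvFindIdx_shift (l : List Char) : ∀ cnt idx, pvFindIdx cnt idx l = idx + pvFindIdx cnt 0 l := by
  induction l with
  | nil => intro cnt idx; simp [pvFindIdx]
  | cons c t ih =>
    intro cnt idx
    simp only [pvFindIdx]
    by_cases h : cnt + (if c = '(' then 1 else -1) = 0
    · simp [h]
    · simp only [h, if_false]
      rw [ih _ (idx + 1), ih _ (0 + 1)]
      omega

theorem pvChunkLen_eq (l : List Char) : ∀ cnt, pvChunkLen cnt l = min (pvFindIdx cnt 0 l + 1) l.length := by
  induction l with
  | nil => intro cnt; simp [pvChunkLen, pvFindIdx]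
  | cons c t ih =>
    intro cnt
    simp only [pvChunkLen, pvFindIdx]
    by_cases h : cnt + (if c = '(' then 1 else -1) = 0
    · simp [h]
    · simp only [h, if_false, List.length_cons]
      rw [ih, pvFindIdx_shift t _ (0 + 1)]
      omega

theorem take_clamp (l : List Char) (n : Nat) : l.take n = l.take (min n l.length) := by
  rcases Nat.le_total n l.length with h | h
  · rw [Nat.min_eq_left h]
  · rw [Nat.min_eq_right h, List.take_of_length_le h, List.take_length]

theorem drop_clamp (l : List Char) (n : Nat) : l.drop n = l.drop (min n l.length) := by
  rcases Nat.le_total n l.length with h | h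
  · rw [Nat.min_eq_left h]
  · rw [Nat.min_eq_right h, List.drop_of_length_le h, List.drop_length]

theorem pvSecond_eq_step (c : Char) (r rv : List Char) :
    pvSecond (c :: r) rv = pvStep (c :: r) rv := by
  by_cases hc : c = '('
  · simp [pvSecond, pvStep, hc]
  · simp [pvSecond, pvStep, pvFlipMid, hc]

theorem pvMain : ∀ n (l : List Char), l.length ≤ n → pvRecA l = (pvChunks l).foldr pvStep [] := by
  intro n
  induction n with
  | zero =>
    intro l hl
    have : l = [] := List.eq_nil_of_length_eq_zero (Nat.le_zero.mp hl)
    subst this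
    rw [pvRecA_nil, pvChunks_nil]; rfl
  | succ n ih =>
    intro l hl
    match l with
    | [] => rw [pvRecA_nil, pvChunks_nil]; rfl
    | c0 :: t =>
      have hk : pvChunkLen 0 (c0 :: t) = min (pvFindIdx 0 0 (c0 :: t) + 1) (c0 :: t).length :=
        pvChunkLen_eq _ 0
      have htake : (c0 :: t).take (pvFindIdx 0 0 (c0 :: t) + 1) = (c0 :: t).take (pvChunkLen 0 (c0 :: t)) := by
        rw [hk, ← take_clamp]
      have hdrop : (c0 :: t).drop (pvFindIdx 0 0 (c0 :: t) + 1) = (c0 :: t).drop (pvChunkLen 0 (c0 :: t)) := by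
        rw [hk, ← drop_clamp]
      have hkpos : 1 ≤ pvChunkLen 0 (c0 :: t) := pvChunkLen_pos c0 t 0
      have hdroplen : ((c0 :: t).drop (pvChunkLen 0 (c0 :: t))).length ≤ n := by
        simp only [List.length_drop, List.length_cons]
        simp only [List.length_cons] at hl
        omega
      have ihv := ih ((c0 :: t).drop (pvChunkLen 0 (c0 :: t))) hdroplen
      have hu : (c0 :: t).take (pvChunkLen 0 (c0 :: t)) = c0 :: t.take (pvChunkLen 0 (c0 :: t) - 1) := by
        obtain ⟨k, hk'⟩ : ∃ k, pvChunkLen 0 (c0 :: t) = k + 1 :=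
          ⟨pvChunkLen 0 (c0 :: t) - 1, by omega⟩
        rw [hk']; simp
      rw [pvRecA_cons, pvChunks_cons, List.foldr_cons, htake, hdrop, ← ihv, hu,
        pvSecond_eq_step]

-- ===== VERDICT (by name: the statement is the Claim_ definition above) =====
theorem solution_spec : Claim_equal_solution := by
  intro p _
  unfold Spec_solution solution solution_alt
  rw [pvMain p.toList.length p.toList (le_refl _)]
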